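-- pv_equiv track=rewrite | github.com/PnuLikeLion9th/Summer_algorithm | kangwook/6주차/모의고사.py | solution
-- ===== SOURCE A (Python) =====
-- def solution(answers):
--     a=[1,2,3,4,5]*2000
--     b=[2,1,2,3,2,4,2,5]*1250
--     c=[3,3,1,1,2,2,4,4,5,5]*1000
--     aa=a[0:len(answers)]
--     bb=b[0:len(answers)]
--     cc=c[0:len(answers)]
--     def score(test,sol):
--         count=0
--         for i in range(len(sol)):
--             if test[i] == sol[i]: count+=1
--         return count
--     max_score= max(score(aa,answers),score(bb,answers),score(cc,answers))
--     k=[score(aa,answers),score(bb,answers),score(cc,answers)]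
--     j=[]
--     for i in range(3):
--         if max_score == k[i]:
--             j.append(i+1)
--     return j
-- ===== SOURCE B (Python) =====
-- def solution(answers):
--     patterns = [[1, 2, 3, 4, 5],
--                 [2, 1, 2, 3, 2, 4, 2, 5],
--                 [3, 3, 1, 1, 2, 2, 4, 4, 5, 5]]
--     # One histogram pass: hist[(r, v)] = how many positions i have i % 40 == r and answers[i] == v.
--     # 40 = lcm(5, 8, 10), so every pattern's expected answer is a function of i % 40.
--     hist = {}
--     for i, x in enumerate(answers):
--         key = (i % 40, x)
--         hist[key] = hist.get(key, 0) + 1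
--     scores = [sum(hist.get((r, p[r % len(p)]), 0) for r in range(40)) for p in patterns]
--     m = max(scores)
--     return [k + 1 for k in range(3) if scores[k] == m]
-- ===== Notes on version B (the rewrite author's own statement) =====
-- stated objective: alternative
-- what changed: B replaces A's materialised 10000-element repeated pattern lists and six per-element scoring scans by a single histogram pass that counts answers per (position mod 40, value) bucket in a dict, then computes each score as a sum of 40 bucket lookups (40 = lcm of the pattern lengths), so no per-element comparison against any pattern is ever made.
import Mathlib
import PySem

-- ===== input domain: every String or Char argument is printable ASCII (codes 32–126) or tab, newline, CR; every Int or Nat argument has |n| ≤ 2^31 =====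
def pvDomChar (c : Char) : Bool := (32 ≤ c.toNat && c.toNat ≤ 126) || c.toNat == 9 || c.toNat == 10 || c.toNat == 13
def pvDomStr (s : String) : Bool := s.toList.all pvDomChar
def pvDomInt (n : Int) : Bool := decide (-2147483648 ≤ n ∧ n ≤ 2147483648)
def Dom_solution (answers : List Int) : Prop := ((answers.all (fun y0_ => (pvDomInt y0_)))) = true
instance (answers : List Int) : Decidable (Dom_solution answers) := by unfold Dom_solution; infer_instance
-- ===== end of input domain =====

-- B replaces A's prebuilt 10000-element pattern tables and six per-element scoring scans by one
-- histogram pass over (index mod 40, answer) buckets; each score is then a sum of 40 bucket lookups.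

-- ===== PORT A =====
-- helper: A's inner 'score' (test[i] ported with pyGetD; in range on every Pre_ input)
def pvScore (test sol : List Int) : Int :=
  (PySem.List.pyRange 0 (sol.length : Int) 1).foldl
    (fun count i =>
      if PySem.List.pyGetD test i 0 = PySem.List.pyGetD sol i 0 then count + 1 else count) 0

def solution (answers : List Int) : List Int :=
  let a := (List.replicate 2000 ([1,2,3,4,5] : List Int)).flatten
  let b := (List.replicate 1250 ([2,1,2,3,2,4,2,5] : List Int)).flatten
  let c := (List.replicate 1000 ([3,3,1,1,2,2,4,4,5,5] : List Int)).flatten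
  let aa := PySem.List.slice a (some 0) (some (answers.length : Int))
  let bb := PySem.List.slice b (some 0) (some (answers.length : Int))
  let cc := PySem.List.slice c (some 0) (some (answers.length : Int))
  let maxScore := max (max (pvScore aa answers) (pvScore bb answers)) (pvScore cc answers)
  let k := [pvScore aa answers, pvScore bb answers, pvScore cc answers]
  (PySem.List.pyRange 0 3 1).foldl
    (fun j i => if maxScore = PySem.List.pyGetD k i 0 then j ++ [i + 1] else j) []

-- ===== PORT B =====
def solution_alt (answers : List Int) : List Int :=
  let patterns : List (List Int) := [[1,2,3,4,5],[2,1,2,3,2,4,2,5],[3,3,1,1,2,2,4,4,5,5]]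
  let hist := (PySem.List.enumerate answers 0).foldl
      (fun (d : PySem.Dict (Int × Int) Int) ix =>
        d.insert (PySem.Int.mod ix.1 40, ix.2) (d.getD (PySem.Int.mod ix.1 40, ix.2) 0 + 1))
      PySem.Dict.empty
  let scores := patterns.map (fun p =>
    ((PySem.List.pyRange 0 40 1).map (fun r =>
      hist.getD (r, PySem.List.pyGetD p (PySem.Int.mod r (p.length : Int)) 0) 0)).sum)
  let m := (PySem.List.max? scores (fun s => s)).getD 0
  ((PySem.List.pyRange 0 3 1).filter
      (fun k => PySem.List.pyGetD scores k 0 == m)).map (fun k => k + 1)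

-- ===== PRECONDITION & SPEC =====
-- Pre_ excludes answer lists longer than 10000, on which A's score() raises IndexError.
def Pre_solution (answers : List Int) : Prop := answers.length ≤ 10000
instance (answers : List Int) : Decidable (Pre_solution answers) := by
  unfold Pre_solution; infer_instance
def pvWitness_solution : List Int := [1, 3, 2, 4, 2]

def Spec_solution (answers : List Int) (out : List Int) : Prop := out = solution_alt answers
instance (answers : List Int) (out : List Int) : Decidable (Spec_solution answers out) := by
  unfold Spec_solution; infer_instance

-- ===== CLAIM (what is proved, stated in full; the proofs are below) =====
def Claim_equal_solution : Prop :=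
  ∀ (answers : List Int), Dom_solution answers → Pre_solution answers →
    Spec_solution answers (solution answers)

-- ===== LEMMAS AND PROOFS =====

-- flatten of replicate indexes modulo the pattern length
theorem getD_flatten_replicate (p : List Int) (K m : Nat) (hm : m < K * p.length) :
    ((List.replicate K p).flatten).getD m 0 = p.getD (m % p.length) 0 := by
  induction K generalizing m with
  | zero => simp at hm
  | succ K ih =>
    have hm' : m < K * p.length + p.length := by
      calc m < (K + 1) * p.length := hm
        _ = K * p.length + p.length := by ring
    simp only [List.replicate_succ, List.flatten_cons]
    by_cases h : m < p.length
    · rw [List.getD_eq_getElem?_getD, List.getElem?_append_left h,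
        Nat.mod_eq_of_lt h, ← List.getD_eq_getElem?_getD]
    · rw [Nat.not_lt] at h
      rw [List.getD_eq_getElem?_getD, List.getElem?_append_right h,
        ← List.getD_eq_getElem?_getD, ih (m - p.length) (by omega)]
      congr 1
      exact (Nat.mod_eq_sub_mod h).symm

-- A's score against a sliced repeated pattern is a countP over the enumerated answers
theorem scoreA_eq_countP (p : List Int) (K : Nat) (answers : List Int)
    (h : answers.length ≤ K * p.length) :
    pvScore (PySem.List.slice ((List.replicate K p).flatten) (some 0)
        (some (answers.length : Int))) answers
      = ((PySem.List.enumerate answers 0).countP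
          (fun ix => ix.2 == PySem.List.pyGetD p (PySem.Int.mod ix.1 (p.length : Int)) 0) : Int) := by
  unfold pvScore
  rw [PySem.List.foldl_ite_add_one]
  rw [PySem.List.enumerate_eq_map_pyRange (d := 0), List.countP_map]
  rw [zero_add]
  congr 1
  apply List.countP_congr
  intro i hi
  rw [PySem.List.mem_pyRange_one] at hi
  obtain ⟨m, rfl⟩ := Int.eq_ofNat_of_zero_le hi.1
  have hm : m < answers.length := by exact_mod_cast hi.2
  have hKp : m < K * p.length := by omega
  simp only [Function.comp, PySem.Int.mod_natCast, PySem.List.pyGetD_natCast,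
    PySem.List.slice_zero_start, PySem.List.slice_to_natCast,
    List.getD_eq_getElem?_getD, List.getElem?_take_of_lt hm]
  rw [← List.getD_eq_getElem?_getD, ← List.getD_eq_getElem?_getD,
    getD_flatten_replicate p K m hKp]
  simp only [decide_eq_true_eq, beq_iff_eq, ← List.getD_eq_getElem?_getD]
  exact eq_comm

-- summing an indicator over a nodup list containing a picks out a
theorem sum_map_ite_unique (rs : List Int) (a : Int) (Q : Int → Prop) [DecidablePred Q]
    (hnd : rs.Nodup) (ha : a ∈ rs) :
    (rs.map (fun r => if r = a ∧ Q r then (1 : Int) else 0)).sum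
      = if Q a then 1 else 0 := by
  induction rs with
  | nil => simp at ha
  | cons x t ih =>
    rw [List.nodup_cons] at hnd
    simp only [List.map_cons, List.sum_cons]
    by_cases hxa : x = a
    · subst hxa
      have hz : (t.map (fun r => if r = x ∧ Q r then (1 : Int) else 0)).sum = 0 := by
        apply List.sum_eq_zero
        intro y hy
        obtain ⟨r, hr, rfl⟩ := List.mem_map.mp hy
        have hrx : ¬ r = x := fun h => hnd.1 (h ▸ hr)
        simp [hrx]
      rw [hz]
      by_cases hq : Q x <;> simp [hq]
    · have hat : a ∈ t := by
        rcases List.mem_cons.mp ha with h | h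
        · exact absurd h.symm hxa
        · exact h
      rw [ih hnd.2 hat]
      simp [hxa]

-- partitioning a countP over the (nodup) list of possible key values
theorem sum_countP_key (l : List (Int × Int)) (rs : List Int) (g : Int → Int)
    (key : Int × Int → Int) (hnd : rs.Nodup) (hk : ∀ e ∈ l, key e ∈ rs) :
    (rs.map (fun r => ((l.countP (fun e => (key e, e.2) == (r, g r)) : Nat) : Int))).sum
      = ((l.countP (fun e => e.2 == g (key e)) : Nat) : Int) := by
  induction l with
  | nil => simp
  | cons e t ih =>
    have hkt : ∀ x ∈ t, key x ∈ rs := fun x hx => hk x (List.mem_cons_of_mem _ hx)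
    have hke : key e ∈ rs := hk e List.mem_cons_self
    simp only [List.countP_cons]
    have hsplit :
        (rs.map (fun r => (((t.countP (fun x => (key x, x.2) == (r, g r)) : Nat) +
            (if (key e, e.2) == (r, g r) then 1 else 0 : Nat) : Nat) : Int))).sum
          = (rs.map (fun r => ((t.countP (fun x => (key x, x.2) == (r, g r)) : Nat) : Int))).sum
            + (rs.map (fun r => if r = key e ∧ e.2 = g r then (1 : Int) else 0)).sum := by
      rw [← PySem.List.sum_map_add_int]
      congr 1
      apply List.map_congr_left
      intro r _
      push_cast
      congr 1
      by_cases h : ((key e, e.2) == (r, g r)) = true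
      · have h' : (key e, e.2) = (r, g r) := eq_of_beq h
        have h1 : r = key e := (congrArg Prod.fst h').symm
        have h2 : e.2 = g r := congrArg Prod.snd h'
        simp [h1, h2]
      · have hn : ¬ (r = key e ∧ e.2 = g r) := by
          rintro ⟨rfl, h2⟩
          exact h (by simp [h2])
        simp [h, hn]
    rw [hsplit, ih hkt, sum_map_ite_unique rs (key e) (fun r => e.2 = g r) hnd hke]
    by_cases hq : e.2 = g (key e) <;> simp [hq]

-- B's per-pattern score (histogram-sum) equals A's countP, for a pattern length dividing 40
theorem scoreB_eq_countP (answers : List Int) (p : List Int)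
    (hdvd : (p.length : Int) ∣ 40) (hpos : 0 < p.length) :
    ((PySem.List.pyRange 0 40 1).map (fun r =>
        (((PySem.List.enumerate answers 0).foldl
          (fun (d : PySem.Dict (Int × Int) Int) ix =>
            d.insert (PySem.Int.mod ix.1 40, ix.2) (d.getD (PySem.Int.mod ix.1 40, ix.2) 0 + 1))
          PySem.Dict.empty).getD
            (r, PySem.List.pyGetD p (PySem.Int.mod r (p.length : Int)) 0) 0))).sum
      = ((PySem.List.enumerate answers 0).countP
          (fun ix => ix.2 == PySem.List.pyGetD p (PySem.Int.mod ix.1 (p.length : Int)) 0) : Int) := by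
  have hL : (0 : Int) < (p.length : Int) := by exact_mod_cast hpos
  -- the fold is a counter over the keyed list
  have hfold :
      (PySem.List.enumerate answers 0).foldl
          (fun (d : PySem.Dict (Int × Int) Int) ix =>
            d.insert (PySem.Int.mod ix.1 40, ix.2) (d.getD (PySem.Int.mod ix.1 40, ix.2) 0 + 1))
          PySem.Dict.empty
        = ((PySem.List.enumerate answers 0).map
            (fun ix => (PySem.Int.mod ix.1 40, ix.2))).foldl
            (fun (d : PySem.Dict (Int × Int) Int) k => d.insert k (d.getD k 0 + 1))
            PySem.Dict.empty := by
    rw [List.foldl_map]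
  rw [hfold]
  have hget : ∀ v : Int × Int,
      (((PySem.List.enumerate answers 0).map
          (fun ix => (PySem.Int.mod ix.1 40, ix.2))).foldl
          (fun (d : PySem.Dict (Int × Int) Int) k => d.insert k (d.getD k 0 + 1))
          PySem.Dict.empty).getD v 0
        = (((PySem.List.enumerate answers 0).map
            (fun ix => (PySem.Int.mod ix.1 40, ix.2))).count v : Int) := by
    intro v
    rw [PySem.Dict.getD_foldl_insert_add_one]
    simp [PySem.Dict.empty, PySem.Dict.getD, PySem.Dict.get?]
  simp only [hget]
  -- count after map is a countP over the enumerated list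
  have hcount : ∀ v : Int × Int,
      ((PySem.List.enumerate answers 0).map (fun ix => (PySem.Int.mod ix.1 40, ix.2))).count v
        = (PySem.List.enumerate answers 0).countP
            (fun ix => (PySem.Int.mod ix.1 40, ix.2) == v) := by
    intro v
    rw [List.count_eq_countP, List.countP_map]
    rfl
  simp only [hcount]
  rw [sum_countP_key (PySem.List.enumerate answers 0) (PySem.List.pyRange 0 40 1)
      (fun r => PySem.List.pyGetD p (PySem.Int.mod r (p.length : Int)) 0)
      (fun ix => PySem.Int.mod ix.1 40)
      (by rw [show PySem.List.pyRange 0 40 1 = [0,1,2,3,4,5,6,7,8,9,10,11,12,13,14,15,16,17,18,19,20,21,22,23,24,25,26,27,28,29,30,31,32,33,34,35,36,37,38,39] from by decide]; decide)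
      (by
        intro e _
        rw [PySem.List.mem_pyRange_one]
        exact ⟨PySem.Int.mod_nonneg e.1 (by norm_num), PySem.Int.mod_lt e.1 (by norm_num)⟩)]
  congr 1
  apply List.countP_congr
  intro e _
  have hmm : PySem.Int.mod (PySem.Int.mod e.1 40) (p.length : Int) = PySem.Int.mod e.1 (p.length : Int) := by
    rw [PySem.Int.mod_eq_emod_of_pos (by norm_num : (0:Int) < 40),
      PySem.Int.mod_eq_emod_of_pos hL, PySem.Int.mod_eq_emod_of_pos hL]
    exact Int.emod_emod_of_dvd e.1 hdvd
  simp only [beq_iff_eq, hmm]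


theorem solution_spec : Claim_equal_solution := by
  intro answers _ hpre
  unfold Spec_solution solution solution_alt Pre_solution at *
  simp only [List.map_cons, List.map_nil]
  rw [scoreB_eq_countP answers ([1,2,3,4,5] : List Int) (by decide) (by decide),
      scoreB_eq_countP answers ([2,1,2,3,2,4,2,5] : List Int) (by decide) (by decide),
      scoreB_eq_countP answers ([3,3,1,1,2,2,4,4,5,5] : List Int) (by decide) (by decide),
      ← scoreA_eq_countP ([1,2,3,4,5] : List Int) 2000 answers (by simpa using hpre),
      ← scoreA_eq_countP ([2,1,2,3,2,4,2,5] : List Int) 1250 answers (by simpa using hpre),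
      ← scoreA_eq_countP ([3,3,1,1,2,2,4,4,5,5] : List Int) 1000 answers (by simpa using hpre)]
  generalize pvScore (PySem.List.slice ((List.replicate 2000 ([1,2,3,4,5] : List Int)).flatten) (some 0) (some (answers.length : Int))) answers = s1
  generalize pvScore (PySem.List.slice ((List.replicate 1250 ([2,1,2,3,2,4,2,5] : List Int)).flatten) (some 0) (some (answers.length : Int))) answers = s2
  generalize pvScore (PySem.List.slice ((List.replicate 1000 ([3,3,1,1,2,2,4,4,5,5] : List Int)).flatten) (some 0) (some (answers.length : Int))) answers = s3
  rw [PySem.List.max?_id_cons]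
  simp only [List.foldl_cons, List.foldl_nil, Option.getD_some]
  rw [show PySem.List.pyRange 0 3 1 = [0, 1, 2] from by decide]
  generalize max (max s1 s2) s3 = M
  rw [PySem.List.foldl_append_ite (p := fun i => M = PySem.List.pyGetD [s1, s2, s3] i 0)
      (f := fun i => i + 1)]
  rw [List.nil_append]
  congr 1
  apply List.filter_congr
  intro x _
  by_cases h : M = PySem.List.pyGetD [s1, s2, s3] x 0
  · simp [h]
  · simp only [h, decide_false]
    exact (beq_eq_false_iff_ne.mpr (fun hh => h hh.symm)).symm
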